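-- pv_equiv track=rewrite | github.com/gopinath2866/sis-rules-engine | pro_features/features.py | get_available_features
-- ===== SOURCE A (Python) =====
-- FEATURE_FLAGS = {
--     "free": {
--         "basic_validation": True,
--         "terraform_support": True,
--         "community_rules": True,
--         "cli_interface": True
--     },
--     "pro": {
--         "compliance_rules": True,
--         "custom_rule_builder": True,
--         "api_rate_limits": True,
--         "advanced_parsers": True
--     },
--     "enterprise": {
--         "on_premise_deployment": True,
--         "sso_integration": True,
--         "custom_parsers": True,
--         "priority_support": True,
--         "training_included": True
--     }
-- }
--
-- def get_available_features(license_tier="free"):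
--     """Get all available features for a license tier"""
--     features = []
--     for tier in ["free", "pro", "enterprise"]:
--         if tier == license_tier or (tier == "free" and license_tier in ["pro", "enterprise"]):
--             for feature, enabled in FEATURE_FLAGS[tier].items():
--                 if enabled:
--                     features.append(feature)
--     return features
-- ===== SOURCE B (Python) =====
-- FEATURE_FLAGS = {
--     "free": {
--         "basic_validation": True,
--         "terraform_support": True,
--         "community_rules": True,
--         "cli_interface": True
--     },
--     "pro": {
--         "compliance_rules": True,
--         "custom_rule_builder": True,
--         "api_rate_limits": True,
--         "advanced_parsers": True
--     },
--     "enterprise": {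
--         "on_premise_deployment": True,
--         "sso_integration": True,
--         "custom_parsers": True,
--         "priority_support": True,
--         "training_included": True
--     }
-- }
--
--
-- def _enabled(tier):
--     """Enabled feature names of one tier, in dict insertion order."""
--     return [feature for feature, enabled in FEATURE_FLAGS[tier].items() if enabled]
--
--
-- def _build_available():
--     """Precompute the complete feature list for every tier, once."""
--     free = _enabled("free")
--     table = {"free": list(free)}
--     for tier in ("pro", "enterprise"):
--         table[tier] = free + _enabled(tier)
--     return table
--
--
-- _AVAILABLE = _build_available()
--
--
-- def get_available_features(license_tier="free"):
--     """Get all available features for a license tier"""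
--     return list(_AVAILABLE.get(license_tier, []))
-- ===== Notes on version B (the rewrite author's own statement) =====
-- stated objective: simpler
-- what changed: B precomputes, in a one-time staged build, the complete feature list for each tier (free's enabled features prefixed to pro's / enterprise's), so each call is a single dict lookup with [] default and performs no per-call iteration or tier-condition checks, unlike A's per-call guarded scan over all three tiers.
import Mathlib
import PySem

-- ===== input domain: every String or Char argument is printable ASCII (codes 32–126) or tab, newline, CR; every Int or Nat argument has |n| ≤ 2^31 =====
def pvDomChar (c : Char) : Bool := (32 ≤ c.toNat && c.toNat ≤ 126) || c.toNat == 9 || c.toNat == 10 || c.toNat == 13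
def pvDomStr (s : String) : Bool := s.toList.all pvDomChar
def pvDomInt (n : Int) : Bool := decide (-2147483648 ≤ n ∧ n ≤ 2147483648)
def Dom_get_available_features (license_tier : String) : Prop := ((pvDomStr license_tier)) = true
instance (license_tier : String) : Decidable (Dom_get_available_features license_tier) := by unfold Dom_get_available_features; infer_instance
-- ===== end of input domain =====

-- B precomputes the full feature list per tier once (free's features prefixed), so each call
-- is a single dict lookup with [] default; objective: simpler.

-- ===== PORT A =====
-- FEATURE_FLAGS (dict of dicts, insertion order)
def pvFeatureFlags : PySem.Dict String (PySem.Dict String Bool) :=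
  PySem.Dict.ofList
    [("free", PySem.Dict.ofList
        [("basic_validation", true), ("terraform_support", true),
         ("community_rules", true), ("cli_interface", true)]),
     ("pro", PySem.Dict.ofList
        [("compliance_rules", true), ("custom_rule_builder", true),
         ("api_rate_limits", true), ("advanced_parsers", true)]),
     ("enterprise", PySem.Dict.ofList
        [("on_premise_deployment", true), ("sso_integration", true),
         ("custom_parsers", true), ("priority_support", true),
         ("training_included", true)])]

def get_available_features (license_tier : String) : List String :=
  (["free", "pro", "enterprise"].foldl (fun features tier =>
    if tier == license_tier || (tier == "free" && (license_tier == "pro" || license_tier == "enterprise")) then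
      -- FEATURE_FLAGS[tier].items(): tier is always in this literal dict, so getD empty is exact here
      ((pvFeatureFlags.getD tier PySem.Dict.empty).items).foldl
        (fun fs p => if p.2 then fs ++ [p.1] else fs) features
    else features) [])

-- ===== PORT B =====
-- _enabled(tier): enabled feature names of one tier, in dict insertion order
def pvEnabled (tier : String) : List String :=
  ((pvFeatureFlags.getD tier PySem.Dict.empty).items).filterMap
    (fun p => if p.2 then some p.1 else none)

-- _build_available(): precompute the complete feature list for every tier, once
def pvBuildAvailable : PySem.Dict String (List String) :=
  let free := pvEnabled "free"
  ["pro", "enterprise"].foldl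
    (fun table tier => table.insert tier (free ++ pvEnabled tier))
    (PySem.Dict.ofList [("free", free)])

def pvAvailable : PySem.Dict String (List String) := pvBuildAvailable

def get_available_features_alt (license_tier : String) : List String :=
  pvAvailable.getD license_tier []

-- ===== PRECONDITION & SPEC =====
def Spec_get_available_features (license_tier : String) (out : List String) : Prop := out = get_available_features_alt license_tier
instance (license_tier : String) (out : List String) : Decidable (Spec_get_available_features license_tier out) := by unfold Spec_get_available_features; infer_instance

-- ===== CLAIM (what is proved, stated in full; the proofs are below) =====
def Claim_equal_get_available_features : Prop := ∀ (license_tier : String), Dom_get_available_features license_tier → Spec_get_available_features license_tier (get_available_features license_tier)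

-- ===== LEMMAS AND PROOFS =====
theorem gaf_keys : pvAvailable.keys = ["free", "pro", "enterprise"] := by decide

theorem gaf_eq (lt : String) :
    get_available_features lt = get_available_features_alt lt := by
  by_cases h1 : lt = "free"
  · subst h1; decide
  by_cases h2 : lt = "pro"
  · subst h2; decide
  by_cases h3 : lt = "enterprise"
  · subst h3; decide
  -- unknown tier: A's guards are all false, B's lookup misses
  have hcon : pvAvailable.contains lt = false := by
    rw [PySem.Dict.contains_eq_decide_mem_keys, gaf_keys]
    simp [h1, h2, h3]
  have hB : get_available_features_alt lt = [] :=
    PySem.Dict.getD_of_not_contains pvAvailable [] hcon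
  rw [hB]
  simp [get_available_features, Ne.symm h1, Ne.symm h2, Ne.symm h3, h2, h3]

-- ===== VERDICT (by name: the statement is the Claim_ definition above) =====
theorem get_available_features_spec : Claim_equal_get_available_features := by
  intro lt _
  exact gaf_eq lt
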